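-- pv_equiv track=rewrite | github.com/jsliacan/overtaking | src/modularity.py | dispersion_score
-- ===== SOURCE A (Python) =====
-- def dispersion_score(L):
--     """
--     Input is a list L of N lateral distance values.
--
--     Output is a score (out of N) of pts v = (i, l(i)) such that
--     there's a ball B(v, rx, ry) with radiuses rx and ry around v such
--     that no other u in L is inside B.
--     """
--
--     disp_score = 0
--     rx = 5
--     ry = 30
--
--     for i, li in enumerate(L):
--         inside_ball_count = 0
--         for j, lj in enumerate(L):
--             # only care about distinct pts
--             if i != j:
--                 if abs(i-j) > rx or abs(li - lj) > ry:
--                     continue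
--                 else:
--                     inside_ball_count += 1
--         if inside_ball_count < 4:
--             disp_score += 1
--
--     return disp_score
-- ===== SOURCE B (Python) =====
-- def dispersion_score(L):
--     # Window scan: only indices j with |i-j| <= rx can be inside the ball,
--     # so scan the fixed index window [i-5, i+5] instead of all pairs.
--     n = len(L)
--     score = 0
--     for i in range(n):
--         near = 0
--         for j in range(max(0, i - 5), min(n, i + 6)):
--             if j != i and abs(L[i] - L[j]) <= 30:
--                 near += 1
--         if near < 4:
--             score += 1
--     return score
-- ===== Notes on version B (the rewrite author's own statement) =====
-- stated objective: faster
-- what changed: Instead of scanning all N^2 index pairs, B scans for each i only the fixed index window [i-5, i+5] (the only indices that can satisfy abs(i-j) <= rx), making the inner loop constant-size.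
import Mathlib
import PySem

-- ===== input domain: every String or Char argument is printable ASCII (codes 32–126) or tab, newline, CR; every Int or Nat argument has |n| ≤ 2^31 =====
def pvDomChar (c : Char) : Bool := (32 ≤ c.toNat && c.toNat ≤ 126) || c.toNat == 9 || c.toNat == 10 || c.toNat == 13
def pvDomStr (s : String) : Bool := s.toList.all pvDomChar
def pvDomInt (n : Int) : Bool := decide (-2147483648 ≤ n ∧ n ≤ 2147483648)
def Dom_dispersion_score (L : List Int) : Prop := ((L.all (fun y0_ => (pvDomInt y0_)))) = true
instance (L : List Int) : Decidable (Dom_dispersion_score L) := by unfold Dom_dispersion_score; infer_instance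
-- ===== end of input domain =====

-- B scans only the fixed index window |i-j| <= 5 instead of all pairs (faster, measured asymptotic).

-- ===== PORT A =====
def dispersion_score (L : List Int) : Int :=
  (PySem.List.enumerate L).foldl (fun disp p =>
    let inner := (PySem.List.enumerate L).foldl (fun c q =>
      if p.1 ≠ q.1 then
        if |p.1 - q.1| > 5 ∨ |p.2 - q.2| > 30 then c else c + 1
      else c) (0 : Int)
    if inner < 4 then disp + 1 else disp) 0

-- ===== PORT B =====
def dispersion_score_alt (L : List Int) : Int :=
  let n := PySem.List.len L
  (PySem.List.pyRange 0 n).foldl (fun score i =>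
    let near := (PySem.List.pyRange (max 0 (i - 5)) (min n (i + 6))).foldl (fun near j =>
      if j ≠ i ∧ |PySem.List.pyGetD L i 0 - PySem.List.pyGetD L j 0| ≤ 30 then near + 1 else near) (0 : Int)
    if near < 4 then score + 1 else score) 0

-- ===== PRECONDITION & SPEC =====
def Spec_dispersion_score (L : List Int) (out : Int) : Prop := out = dispersion_score_alt L
instance (L : List Int) (out : Int) : Decidable (Spec_dispersion_score L out) := by unfold Spec_dispersion_score; infer_instance

-- ===== CLAIM (what is proved, stated in full; the proofs are below) =====
def Claim_equal_dispersion_score : Prop := ∀ (L : List Int), Dom_dispersion_score L → Spec_dispersion_score L (dispersion_score L)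

-- ===== LEMMAS AND PROOFS =====

-- a counting foldl is init + a 0/1 sum
theorem foldl_ite_count {α : Type} (P : α → Prop) [DecidablePred P] (l : List α) (a : Int) :
    List.foldl (fun c q => if P q then c + 1 else c) a l
      = a + (l.map (fun q => if P q then (1 : Int) else 0)).sum := by
  have h : (fun (c : Int) q => if P q then c + 1 else c)
      = (fun (c : Int) q => c + (if P q then (1 : Int) else 0)) := by
    funext c q; split_ifs <;> simp
  rw [h, PySem.List.foldl_add]

-- the nested-if counting loop of port A as a 0/1 sum
theorem foldl_ite2_count {α : Type} (P Q : α → Prop) [DecidablePred P] [DecidablePred Q]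
    (l : List α) (a : Int) :
    List.foldl (fun c q => if P q then (if Q q then c else c + 1) else c) a l
      = a + (l.map (fun q => if P q ∧ ¬ Q q then (1 : Int) else 0)).sum := by
  induction l generalizing a with
  | nil => simp
  | cons x xs ih =>
    simp only [List.foldl_cons, List.map_cons, List.sum_cons, ih]
    by_cases h1 : P x <;> by_cases h2 : Q x <;> (simp [h1, h2]; try ring)

theorem pyGetD_cons_of_pos {α : Type} (x : α) (xs : List α) (m : Int) (d : α) (h : 1 ≤ m) :
    PySem.List.pyGetD (x :: xs) m d = PySem.List.pyGetD xs (m - 1) d := by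
  have hm : m = ((m.toNat - 1 + 1 : Nat) : Int) := by omega
  rw [hm]
  have h2 : ((m.toNat - 1 + 1 : Nat) : Int) - 1 = ((m.toNat - 1 : Nat) : Int) := by omega
  rw [h2, PySem.List.pyGetD_natCast, PySem.List.pyGetD_natCast]
  simp [List.getD]

theorem pyGetD_cons_zero {α : Type} (x : α) (xs : List α) (d : α) :
    PySem.List.pyGetD (x :: xs) 0 d = x := by
  have h := PySem.List.pyGetD_natCast (x :: xs) 0 d
  simp only [Nat.cast_zero, List.getD_cons_zero] at h
  exact h

-- a sum over (enumerate xs k) equals the same sum over explicit indices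
theorem sum_enumerate_eq_range (xs : List Int) (k : Int) (f : Int × Int → Int) :
    ((PySem.List.enumerate xs k).map f).sum
      = ((PySem.List.pyRange k (k + xs.length)).map
          (fun j => f (j, PySem.List.pyGetD xs (j - k) 0))).sum := by
  induction xs generalizing k with
  | nil => simp [PySem.List.enumerate, PySem.List.pyRange]
  | cons x xs ih =>
    have hlc : (((x :: xs).length : Int)) = (xs.length : Int) + 1 := by
      simp only [List.length_cons]; push_cast; ring
    have hcons : PySem.List.pyRange k (k + (x :: xs).length)
        = k :: PySem.List.pyRange (k + 1) (k + (x :: xs).length) := by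
      apply PySem.List.pyRange_one_cons; omega
    rw [hcons]
    simp only [PySem.List.enumerate, List.map_cons, List.sum_cons]
    congr 1
    · have hkk : k - k = (0 : Int) := by ring
      rw [hkk, pyGetD_cons_zero]
    · rw [ih (k + 1)]
      have hb : (k + 1) + (xs.length : Int) = k + ((x :: xs).length : Int) := by omega
      rw [hb]
      apply congrArg
      apply List.map_congr_left
      intro j hj
      rw [PySem.List.mem_pyRange_one] at hj
      rw [pyGetD_cons_of_pos _ _ _ _ (by omega)]
      have : j - (k + 1) = j - k - 1 := by ring
      rw [this]

-- the inner counts agree: the full scan only counts indices inside the window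
theorem inner_eq (L : List Int) (i : Int) (hi : 0 ≤ i) (hn : i < (L.length : Int)) :
    List.foldl (fun c q =>
      if i ≠ q.1 then
        if |i - q.1| > 5 ∨ |PySem.List.pyGetD L i 0 - q.2| > 30 then c else c + 1
      else c) (0 : Int) (PySem.List.enumerate L)
    = List.foldl (fun near j =>
        if j ≠ i ∧ |PySem.List.pyGetD L i 0 - PySem.List.pyGetD L j 0| ≤ 30 then near + 1 else near)
      (0 : Int) (PySem.List.pyRange (max 0 (i - 5)) (min (PySem.List.len L) (i + 6))) := by
  have hlen : PySem.List.len L = (L.length : Int) := by simp [PySem.List.len]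
  rw [hlen]
  refine Eq.trans (foldl_ite2_count _ _ _ _) (Eq.trans ?_ (foldl_ite_count _ _ _).symm)
  simp only [zero_add]
  rw [sum_enumerate_eq_range L 0]
  simp only [sub_zero, zero_add]
  have h1 : (0 : Int) ≤ max 0 (i - 5) := by omega
  have h2 : max 0 (i - 5) ≤ min ((L.length : Int)) (i + 6) := by omega
  have h3 : min ((L.length : Int)) (i + 6) ≤ (L.length : Int) := by omega
  rw [PySem.List.pyRange_one_append 0 (max 0 (i - 5)) ((L.length : Int)) h1 (le_trans h2 h3),
      PySem.List.pyRange_one_append (max 0 (i - 5)) (min ((L.length : Int)) (i + 6)) ((L.length : Int)) h2 h3]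
  rw [List.map_append, List.map_append, List.sum_append, List.sum_append]
  have hpre : ((PySem.List.pyRange 0 (max 0 (i - 5))).map
      (fun j => if (i ≠ j ∧ ¬(|i - j| > 5 ∨ |PySem.List.pyGetD L i 0 - PySem.List.pyGetD L j 0| > 30)) then (1 : Int) else 0)).sum = 0 := by
    apply List.sum_eq_zero
    intro v hv
    simp only [List.mem_map] at hv
    obtain ⟨j, hj, rfl⟩ := hv
    rw [PySem.List.mem_pyRange_one] at hj
    have h5 : (5 : Int) < i - j := by omega
    have habs : (5 : Int) < |i - j| := lt_of_lt_of_le h5 (le_abs_self _)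
    rw [if_neg (fun hc => hc.2 (Or.inl habs))]
  have hsuf : ((PySem.List.pyRange (min ((L.length : Int)) (i + 6)) ((L.length : Int))).map
      (fun j => if (i ≠ j ∧ ¬(|i - j| > 5 ∨ |PySem.List.pyGetD L i 0 - PySem.List.pyGetD L j 0| > 30)) then (1 : Int) else 0)).sum = 0 := by
    apply List.sum_eq_zero
    intro v hv
    simp only [List.mem_map] at hv
    obtain ⟨j, hj, rfl⟩ := hv
    rw [PySem.List.mem_pyRange_one] at hj
    have h5 : (5 : Int) < j - i := by omega
    have habs : (5 : Int) < |i - j| := by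
      rw [abs_sub_comm]
      exact lt_of_lt_of_le h5 (le_abs_self _)
    rw [if_neg (fun hc => hc.2 (Or.inl habs))]
  rw [hpre, hsuf]
  have hmid : ∀ j ∈ PySem.List.pyRange (max 0 (i - 5)) (min ((L.length : Int)) (i + 6)),
      (if (i ≠ j ∧ ¬(|i - j| > 5 ∨ |PySem.List.pyGetD L i 0 - PySem.List.pyGetD L j 0| > 30)) then (1 : Int) else 0)
        = (if (j ≠ i ∧ |PySem.List.pyGetD L i 0 - PySem.List.pyGetD L j 0| ≤ 30) then (1 : Int) else 0) := by
    intro j hj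
    rw [PySem.List.mem_pyRange_one] at hj
    have habs : |i - j| ≤ 5 := abs_le.mpr ⟨by omega, by omega⟩
    by_cases h1 : j = i
    · rw [if_neg (fun hc => hc.1 h1.symm), if_neg (fun hc => hc.1 h1)]
    · by_cases h2 : |PySem.List.pyGetD L i 0 - PySem.List.pyGetD L j 0| ≤ 30
      · rw [if_pos ⟨fun h => h1 h.symm, fun hor => hor.elim (not_lt.mpr habs) (not_lt.mpr h2)⟩,
            if_pos ⟨h1, h2⟩]
      · rw [if_neg (fun hc => hc.2 (Or.inr (not_le.mp h2))), if_neg (fun hc => h2 hc.2)]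
  rw [List.map_congr_left hmid]
  ring

-- ===== VERDICT (by name: the statement is the Claim_ definition above) =====
theorem dispersion_score_spec : Claim_equal_dispersion_score := by
  intro L _
  unfold Spec_dispersion_score dispersion_score dispersion_score_alt
  have hlen : PySem.List.len L = (L.length : Int) := by simp [PySem.List.len]
  rw [foldl_ite_count (fun p : Int × Int =>
        List.foldl (fun c q =>
          if p.1 ≠ q.1 then
            if |p.1 - q.1| > 5 ∨ |p.2 - q.2| > 30 then c else c + 1
          else c) 0 (PySem.List.enumerate L) < 4)]
  rw [foldl_ite_count (fun i : Int =>
        List.foldl (fun near j =>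
          if j ≠ i ∧ |PySem.List.pyGetD L i 0 - PySem.List.pyGetD L j 0| ≤ 30 then near + 1 else near)
          (0 : Int) (PySem.List.pyRange (max 0 (i - 5)) (min (PySem.List.len L) (i + 6))) < 4)]
  simp only [zero_add]
  rw [sum_enumerate_eq_range L 0]
  simp only [sub_zero, zero_add, hlen]
  apply congrArg
  apply List.map_congr_left
  intro i hi
  rw [PySem.List.mem_pyRange_one] at hi
  have h := inner_eq L i hi.1 hi.2
  rw [hlen] at h
  simp only [h]
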